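-- pv_equiv track=rewrite | github.com/rain2473/coding-test | 프로그래머스/0/181932. 코드 처리하기/코드 처리하기.py | solution
-- ===== SOURCE A (Python) =====
-- def solution(code):
--     answer = ''
--     mode = 0
--     for i, x in enumerate(code):
--         if x == '1':
--             mode = (mode == 0) * 1
--             continue
--         if mode == 0:
--             if i % 2 == 0:
--                 answer += x
--         elif i % 2 != 0:
--                 answer += x
--     if answer == '':
--         answer = 'EMPTY'
--     return answer
-- ===== SOURCE B (Python) =====
-- def solution(code):
--     # Segment algorithm: split on the toggle character '1'.  Segment k (0-based)
--     # is processed in mode k % 2; its chars sit at absolute offsets off, off+1, ...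
--     # so the kept ones are exactly the step-2 slice starting at (k - off) % 2.
--     pieces = []
--     off = 0
--     for k, seg in enumerate(code.split('1')):
--         pieces.append(seg[(k - off) % 2::2])
--         off += len(seg) + 1
--     res = ''.join(pieces)
--     return res if res else 'EMPTY'
-- ===== Notes on version B (the rewrite author's own statement) =====
-- stated objective: faster
-- what changed: Replaces A's per-character mode state machine (a flag toggled and consulted on every char, with += string building) by a segment algorithm: split the string on '1', take segment k's step-2 slice starting at (k-off)%2, and join the pieces.
import Mathlib
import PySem

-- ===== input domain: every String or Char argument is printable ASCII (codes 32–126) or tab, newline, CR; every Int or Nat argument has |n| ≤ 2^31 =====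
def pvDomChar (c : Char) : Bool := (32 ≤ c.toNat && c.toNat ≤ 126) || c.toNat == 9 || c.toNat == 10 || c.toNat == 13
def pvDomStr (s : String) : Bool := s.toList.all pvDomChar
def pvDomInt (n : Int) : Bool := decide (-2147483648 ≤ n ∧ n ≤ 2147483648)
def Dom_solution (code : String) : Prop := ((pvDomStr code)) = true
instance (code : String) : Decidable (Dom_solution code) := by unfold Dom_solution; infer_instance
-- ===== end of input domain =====

-- B replaces A's per-character mode state machine by a segment algorithm: split the
-- string on '1', take the appropriate step-2 slice of each segment, join; the timing
-- run measured B faster (objective: faster, constant-factor).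

-- ===== PORT A =====
-- the loop body of A's single fused scan (state = (answer, mode))
def stepA (s : List Char × Int) (p : Int × Char) : List Char × Int :=
  if p.2 = '1' then (s.1, if s.2 = 0 then 1 else 0)
  else if s.2 = 0 then (if PySem.Int.mod p.1 2 = 0 then (s.1 ++ [p.2], s.2) else s)
  else if PySem.Int.mod p.1 2 ≠ 0 then (s.1 ++ [p.2], s.2) else s

def solution (code : String) : String :=
  let st := (PySem.List.enumerate code.toList 0).foldl stepA ([], 0)
  if st.1 = [] then "EMPTY" else String.ofList st.1

-- ===== PORT B =====
-- loop body of Source B: state = (pieces, off); for segment (k, seg) append the slice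
-- seg[(k-off)%2::2] and advance off.  The slice has step 2 ≠ 0, so slice? is always
-- some and the .getD [] default is unreachable.
def stepB (st : List (List Char) × Int) (p : Int × List Char) : List (List Char) × Int :=
  (st.1 ++ [(PySem.List.slice? p.2 (some (PySem.Int.mod (p.1 - st.2) 2)) none 2).getD []],
   st.2 + p.2.length + 1)

def solution_alt (code : String) : String :=
  let st := (PySem.List.enumerate (code.toList.splitOn '1') 0).foldl stepB ([], 0)
  let res := st.1.flatten
  if res = [] then "EMPTY" else String.ofList res

-- ===== PRECONDITION & SPEC =====
def Spec_solution (code : String) (out : String) : Prop := out = solution_alt code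
instance (code : String) (out : String) : Decidable (Spec_solution code out) := by unfold Spec_solution; infer_instance

-- ===== CLAIM (what is proved, stated in full; the proofs are below) =====
def Claim_equal_solution : Prop := ∀ (code : String), Dom_solution code → Spec_solution code (solution code)

-- ===== LEMMAS AND PROOFS =====

-- the canonical result: chars kept from position s onward in mode m
def filt (s m : Int) : List Char → List Char
  | [] => []
  | x :: t =>
    if x = '1' then filt (s + 1) (1 - m) t
    else if s % 2 = m then x :: filt (s + 1) m t else filt (s + 1) m t

-- every second element of a list (indices 0, 2, 4, …)
def everySec {α : Type} : List α → List α
  | [] => []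
  | [x] => [x]
  | x :: _ :: t => x :: everySec t

lemma everySec_cons {α : Type} (x : α) (t : List α) :
    everySec (x :: t) = x :: everySec (t.drop 1) := by
  cases t <;> simp [everySec]

-- ----- A-side: the fused scan computes filt -----
lemma A_scan (l : List Char) : ∀ (s m : Int) (a : List Char), (m = 0 ∨ m = 1) →
    ((PySem.List.enumerate l s).foldl stepA (a, m)).1 = a ++ filt s m l := by
  induction l with
  | nil => simp [PySem.List.enumerate_nil, filt]
  | cons x t ih =>
    intro s m a hm
    have hme : PySem.Int.mod s 2 = s % 2 :=
      PySem.Int.mod_eq_emod_of_pos (by norm_num)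
    by_cases hx : x = '1'
    · subst hx
      have hA : stepA (a, m) (s, '1') = (a, 1 - m) := by
        rcases hm with h | h <;> simp [stepA, h]
      simp only [PySem.List.enumerate_cons, List.foldl_cons, hA, filt,
        ih (s + 1) (1 - m) a (by omega)]
      simp
    · have hsm : s % 2 = 0 ∨ s % 2 = 1 := by omega
      by_cases hp : s % 2 = m
      · have hA : stepA (a, m) (s, x) = (a ++ [x], m) := by
          rcases hm with h | h <;> subst h <;> simp [stepA, hx] <;> omega
        simp only [PySem.List.enumerate_cons, List.foldl_cons, hA, filt, if_neg hx,
          if_pos hp, ih (s + 1) m (a ++ [x]) hm]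
        simp
      · have hA : stepA (a, m) (s, x) = (a, m) := by
          rcases hm with h | h <;> subst h <;> simp [stepA, hx] <;> omega
        simp only [PySem.List.enumerate_cons, List.foldl_cons, hA, filt, if_neg hx,
          if_neg hp, ih (s + 1) m a hm]

-- ----- B-side -----

-- the filterMap core of slice? with step 2 is everySec
lemma filterMap_two (l : List Char) :
    List.filterMap (fun k => l[2 * k]?) (List.range ((l.length + 1) / 2)) = everySec l := by
  generalize hn : l.length = n
  induction n using Nat.strong_induction_on generalizing l with
  | _ n ih =>
    match l, hn with
    | [], rfl => simp [everySec]
    | [x], rfl => simp [everySec, List.range_succ_eq_map]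
    | x :: y :: t, rfl =>
      have hcount : (((x :: y :: t).length + 1) / 2) = (t.length + 1) / 2 + 1 := by
        simp; omega
      rw [hcount, List.range_succ_eq_map, List.filterMap_cons, List.filterMap_map]
      have h0 : (x :: y :: t)[2 * 0]? = some x := by simp
      rw [h0]
      have hrest : (fun k => (x :: y :: t)[2 * k]?) ∘ Nat.succ = fun k => t[2 * k]? := by
        funext k
        show (x :: y :: t)[2 * Nat.succ k]? = t[2 * k]?
        rw [show 2 * Nat.succ k = 2 * k + 1 + 1 by omega, List.getElem?_cons_succ,
          List.getElem?_cons_succ]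
      rw [hrest, ih t.length (by simp) t rfl]
      simp [everySec]

-- the slice Source B takes: seg[r::2] with r ∈ {0, 1}
lemma slice_two (xs : List Char) (r : Int) (hr : r = 0 ∨ r = 1) :
    (PySem.List.slice? xs (some r) none 2).getD [] = everySec (xs.drop r.toNat) := by
  rcases hr with h | h <;> subst h
  · simp only [PySem.List.slice?, PySem.List.sliceIndices]
    norm_num
    rcases xs with _ | ⟨x, t⟩
    · simp [everySec]
    · have hc : (0 : Nat) < (x :: t).length := by simp
      rw [if_pos hc]
      have hcn : (((((x :: t).length : Int)) + 2 - 1) / 2).toNat = ((x :: t).length + 1) / 2 := by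
        omega
      rw [hcn, ← filterMap_two (x :: t)]
      congr 1
  · simp only [PySem.List.slice?, PySem.List.sliceIndices]
    norm_num
    rcases xs with _ | ⟨x, t⟩
    · simp [everySec]
    · have hmin : min (1 : Int) ((x :: t).length : Int) = 1 := by simp
      rw [hmin]
      rcases t with _ | ⟨y, u⟩
      · simp [everySec]
      · have hc : 1 < (x :: y :: u).length := by simp
        rw [if_pos hc]
        have hcn : ((((x :: y :: u).length : Int) - 1 + 2 - 1) / 2).toNat
            = ((y :: u).length + 1) / 2 := by
          simp only [List.length_cons]
          omega
        rw [hcn]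
        simp only [List.tail_cons]
        rw [← filterMap_two (y :: u)]
        congr 1
        funext k
        rw [show ((1 : Int) + 2 * (k : Int)).toNat = 2 * k + 1 by omega]
        exact List.getElem?_cons_succ

-- filt over a '1'-free segment, followed by anything
lemma filt_seg (seg : List Char) : ∀ (s m : Int) (r : List Char),
    '1' ∉ seg → 0 ≤ s → (m = 0 ∨ m = 1) →
    filt s m (seg ++ r)
      = everySec (seg.drop ((m - s) % 2).toNat) ++ filt (s + seg.length) m r := by
  induction seg with
  | nil => intro s m r _ _ _; simp [everySec]
  | cons x t ih =>
    intro s m r hmem hs hm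
    have hx : x ≠ '1' := by simp at hmem; tauto
    have hmt : '1' ∉ t := by simp at hmem; tauto
    by_cases hp : s % 2 = m
    · have hd : ((m - s) % 2).toNat = 0 := by rcases hm with h | h <;> omega
      rw [hd]
      simp only [List.cons_append, filt, if_neg hx, if_pos hp, List.drop_zero]
      rw [ih (s + 1) m r hmt (by omega) hm]
      have hd1 : ((m - (s + 1)) % 2).toNat = 1 := by rcases hm with h | h <;> omega
      rw [hd1, everySec_cons]
      simp only [List.cons_append, List.length_cons]
      push_cast
      ring_nf
    · have hd : ((m - s) % 2).toNat = 1 := by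
        rcases hm with h | h <;> omega
      rw [hd]
      simp only [List.cons_append, filt, if_neg hx, if_neg hp]
      rw [ih (s + 1) m r hmt (by omega) hm]
      have hd0 : ((m - (s + 1)) % 2).toNat = 0 := by
        rcases hm with h | h <;> omega
      rw [hd0]
      simp only [List.drop_one, List.drop_zero, List.tail_cons, List.length_cons]
      push_cast
      ring_nf

-- the B fold over the segment list computes filt of the reassembled string
lemma B_fold (segs : List (List Char)) : ∀ (k s : Int) (pieces : List (List Char)),
    (∀ seg ∈ segs, '1' ∉ seg) → 0 ≤ s → 0 ≤ k →
    (((PySem.List.enumerate segs k).foldl stepB (pieces, s)).1).flatten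
      = pieces.flatten ++ filt s (k % 2) (List.intercalate ['1'] segs) := by
  induction segs with
  | nil => intro k s pieces _ _ _; simp [PySem.List.enumerate_nil, List.intercalate, filt]
  | cons seg rest ih =>
    intro k s pieces hfree hs hk
    have hfs : '1' ∉ seg := hfree seg (by simp)
    have hfr : ∀ sg ∈ rest, '1' ∉ sg := fun sg h => hfree sg (by simp [h])
    have hm2 : k % 2 = 0 ∨ k % 2 = 1 := by omega
    have hrmod : PySem.Int.mod (k - s) 2 = (k - s) % 2 :=
      PySem.Int.mod_eq_emod_of_pos (by norm_num)
    have hrr : (k - s) % 2 = (k % 2 - s) % 2 := by omega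
    have hslice : (PySem.List.slice? seg (some (PySem.Int.mod (k - s) 2)) none 2).getD []
        = everySec (seg.drop ((k % 2 - s) % 2).toNat) := by
      rw [hrmod, hrr]
      exact slice_two seg _ (by omega)
    simp only [PySem.List.enumerate_cons, List.foldl_cons, stepB]
    rcases rest with _ | ⟨b, bs⟩
    · simp only [PySem.List.enumerate_nil, List.foldl_nil, List.flatten_append,
        List.flatten_cons, List.flatten_nil, List.append_nil, hslice]
      have : List.intercalate ['1'] [seg] = seg ++ [] := by
        simp [List.intercalate]
      rw [this, filt_seg seg s (k % 2) [] hfs hs hm2]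
      simp [filt]
    · rw [ih (k + 1) (s + seg.length + 1) (pieces ++ [_]) hfr (by omega) (by omega)]
      have hint : List.intercalate ['1'] (seg :: b :: bs)
          = seg ++ '1' :: List.intercalate ['1'] (b :: bs) := by
        simp [List.intercalate]
      rw [hint, filt_seg seg s (k % 2) ('1' :: List.intercalate ['1'] (b :: bs)) hfs hs hm2]
      simp only [filt, hslice, List.flatten_append, List.flatten_cons,
        List.flatten_nil, List.append_nil, List.append_assoc]
      congr 2
      rw [show (k + 1) % 2 = 1 - k % 2 from by omega, if_pos trivial]

-- segments produced by splitOn contain no separator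
lemma splitOnP_free (p : Char → Bool) (l : List Char) :
    ∀ seg ∈ List.splitOnP p l, ∀ c ∈ seg, p c = false := by
  induction l with
  | nil => simp [List.splitOnP_nil]
  | cons x t ih =>
    intro seg hseg c hc
    rw [List.splitOnP_cons] at hseg
    by_cases hx : p x
    · rw [if_pos hx] at hseg
      rcases List.mem_cons.mp hseg with h | h
      · subst h; simp at hc
      · exact ih seg h c hc
    · rw [if_neg (by simpa using hx)] at hseg
      rcases hl : List.splitOnP p t with _ | ⟨h0, hrest⟩
      · exact absurd hl (List.splitOnP_ne_nil p t)
      · rw [hl] at hseg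
        simp only [List.modifyHead] at hseg
        rcases List.mem_cons.mp hseg with h | h
        · subst h
          rcases List.mem_cons.mp hc with h | h
          · subst h; simpa using hx
          · exact ih h0 (by rw [hl]; simp) c h
        · exact ih seg (by rw [hl]; simp [h]) c hc

-- ===== VERDICT (by name: the statement is the Claim_ definition above) =====
theorem solution_spec : Claim_equal_solution := by
  intro code _
  unfold Spec_solution solution solution_alt
  have hA := A_scan code.toList 0 0 [] (Or.inl rfl)
  have hfree : ∀ seg ∈ code.toList.splitOn '1', '1' ∉ seg := by
    intro seg hseg hmem
    have := splitOnP_free (fun c => c == '1') code.toList seg hseg '1' hmem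
    simp at this
  have hB := B_fold (code.toList.splitOn '1') 0 0 [] hfree le_rfl le_rfl
  simp only [List.flatten_nil, List.nil_append] at hB
  rw [List.intercalate_splitOn code.toList '1'] at hB
  simp only [hA, List.nil_append, hB]
  norm_num
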